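-- pv_equiv track=rewrite | github.com/guige2023/rabai_autoclick | utils/text_processing_utils.py | detect_language_simple
-- ===== SOURCE A (Python) =====
-- def detect_language_simple(text: str) -> str:
--     """
--     Simple language detection based on character distributions.
--
--     Args:
--         text: Input text
--
--     Returns:
--         Detected language code ('en', 'es', 'fr', 'de', etc.)
--
--     Note:
--         This is a heuristic placeholder. Use langdetect for production.
--     """
--     lang_patterns = {
--         "en": {"the", "is", "are", "and", "to", "of", "a", "in"},
--         "es": {"el", "la", "de", "que", "es", "en", "los", "las"},
--         "fr": {"le", "la", "les", "de", "est", "et", "un", "une"},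
--         "de": {"der", "die", "und", "das", "ist", "in", "ein", "eine"},
--     }
--     text_lower = text.lower()
--     scores = {}
--     for lang, chars in lang_patterns.items():
--         score = sum(1 for w in chars if f" {w} " in f" {text_lower} ")
--         scores[lang] = score
--     return max(scores.keys(), key=lambda k: scores[k]) if scores else "en"
-- ===== SOURCE B (Python) =====
-- def detect_language_simple(text: str) -> str:
--     lang_patterns = [
--         ("en", {"the", "is", "are", "and", "to", "of", "a", "in"}),
--         ("es", {"el", "la", "de", "que", "es", "en", "los", "las"}),
--         ("fr", {"le", "la", "les", "de", "est", "et", "un", "une"}),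
--         ("de", {"der", "die", "und", "das", "ist", "in", "ein", "eine"}),
--     ]
--     # one tokenization pass; split(' ') on the padded text reproduces the
--     # " w " substring test exactly (str.split() would differ on tabs/newlines)
--     tokens = set((" " + text.lower() + " ").split(" "))
--     best_lang = "en"
--     best_score = -1
--     for lang, words in lang_patterns:
--         score = len(words & tokens)
--         if score > best_score:
--             best_lang, best_score = lang, score
--     return best_lang
-- ===== Notes on version B (the rewrite author's own statement) =====
-- stated objective: faster
-- what changed: Replaces 32 per-word whole-text substring scans plus a dict-and-max pass with a single tokenization of the padded text into a token set, per-language set intersections, and a running argmax (first language wins ties).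
import Mathlib
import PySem

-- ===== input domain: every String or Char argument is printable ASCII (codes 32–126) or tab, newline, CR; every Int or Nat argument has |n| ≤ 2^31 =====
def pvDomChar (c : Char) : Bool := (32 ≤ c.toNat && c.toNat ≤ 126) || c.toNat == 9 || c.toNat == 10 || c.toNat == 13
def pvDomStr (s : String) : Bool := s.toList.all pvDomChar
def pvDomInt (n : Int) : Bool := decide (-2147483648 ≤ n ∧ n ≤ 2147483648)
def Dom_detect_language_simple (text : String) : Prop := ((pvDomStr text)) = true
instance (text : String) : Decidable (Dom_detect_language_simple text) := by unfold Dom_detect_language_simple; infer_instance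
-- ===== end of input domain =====

-- B replaces A's 32 per-word whole-text substring scans and dict+max pass by one tokenization
-- of the padded lowercased text, per-language set intersections, and a running argmax.

-- ===== PORT A =====
def pvWordsEn : List (List Char) := [['t','h','e'], ['i','s'], ['a','r','e'], ['a','n','d'], ['t','o'], ['o','f'], ['a'], ['i','n']]
def pvWordsEs : List (List Char) := [['e','l'], ['l','a'], ['d','e'], ['q','u','e'], ['e','s'], ['e','n'], ['l','o','s'], ['l','a','s']]
def pvWordsFr : List (List Char) := [['l','e'], ['l','a'], ['l','e','s'], ['d','e'], ['e','s','t'], ['e','t'], ['u','n'], ['u','n','e']]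
def pvWordsDe : List (List Char) := [['d','e','r'], ['d','i','e'], ['u','n','d'], ['d','a','s'], ['i','s','t'], ['i','n'], ['e','i','n'], ['e','i','n','e']]

def pvScoreA (tl : List Char) (ws : List (List Char)) : Int :=
  ws.foldl
    (fun acc w =>
      if PySem.Chars.isIn (' ' :: (w ++ [' '])) (' ' :: (tl ++ [' '])) then acc + 1 else acc)
    (0 : Int)

def pvPatternsA : List (String × List (List Char)) :=
  [("en", pvWordsEn), ("es", pvWordsEs), ("fr", pvWordsFr), ("de", pvWordsDe)]

def detect_language_simple (text : String) : String :=
  let tl := PySem.Chars.lower text.toList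
  let scores : PySem.Dict String Int :=
    pvPatternsA.foldl (fun d p => d.insert p.1 (pvScoreA tl p.2)) PySem.Dict.empty
  match PySem.List.max? scores.keys (fun k => scores.getD k 0) with
  | some k => k
  | none => "en"

def pvScoreB (tokens : PySem.Set (List Char)) (ws : PySem.Set (List Char)) : Int :=
  PySem.Set.len (PySem.Set.inter ws tokens)

def pvPatternsB : List (String × PySem.Set (List Char)) :=
  [("en", PySem.Set.ofList pvWordsEn), ("es", PySem.Set.ofList pvWordsEs),
   ("fr", PySem.Set.ofList pvWordsFr), ("de", PySem.Set.ofList pvWordsDe)]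

def detect_language_simple_alt (text : String) : String :=
  let tokens : PySem.Set (List Char) :=
    PySem.Set.ofList (PySem.Chars.splitOn (' ' :: (PySem.Chars.lower text.toList ++ [' '])) [' '])
  let best :=
    pvPatternsB.foldl
      (fun (best : String × Int) p =>
        let score : Int := pvScoreB tokens p.2
        if best.2 < score then (p.1, score) else best)
      ("en", -1)
  best.1

-- ===== PRECONDITION & SPEC =====
def Spec_detect_language_simple (text : String) (out : String) : Prop := out = detect_language_simple_alt text
instance (text : String) (out : String) : Decidable (Spec_detect_language_simple text out) := by unfold Spec_detect_language_simple; infer_instance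

-- ===== CLAIM (what is proved, stated in full; the proofs are below) =====
def Claim_equal_detect_language_simple : Prop := ∀ (text : String), Dom_detect_language_simple text → Spec_detect_language_simple text (detect_language_simple text)

-- ===== LEMMAS AND PROOFS =====

lemma pv_splitOn_cons_ne (c : Char) (t : List Char) (hc : c ≠ ' ') :
    (c :: t).splitOn ' ' = List.modifyHead (List.cons c) (t.splitOn ' ') := by
  simp [List.splitOn, List.splitOnP_cons, hc]

lemma pv_splitOn_cons_sep (t : List Char) :
    (' ' :: t).splitOn ' ' = [] :: t.splitOn ' ' := by
  simp [List.splitOn, List.splitOnP_cons]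

lemma pv_go_eq (c : Char) : ∀ (fuel : Nat) (l cur : List Char) (acc : List (List Char)),
    l.length < fuel →
    PySem.Chars.splitOn.go [c] fuel l cur acc
      = acc.reverse ++ (l.splitOn c).modifyHead (fun t => cur.reverse ++ t) := by
  intro fuel
  induction fuel with
  | zero => intro l cur acc h; omega
  | succ f ih =>
    intro l cur acc h
    cases l with
    | nil =>
      simp [PySem.Chars.splitOn.go, List.splitOn_nil]
    | cons ch rest =>
      rw [PySem.Chars.splitOn.go]
      by_cases hc : c = ch
      · subst hc
        have hpre : List.isPrefixOf [c] (c :: rest) = true := by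
          simp [List.isPrefixOf]
        simp only [hpre, if_pos]
        rw [ih _ _ _ (by simpa using Nat.lt_of_succ_lt_succ h)]
        obtain ⟨hd, t, he⟩ := List.exists_cons_of_ne_nil (List.splitOnP_ne_nil (· == c) rest)
        simp [List.splitOn, List.splitOnP_cons, he, List.modifyHead_cons]
      · have hpre : List.isPrefixOf [c] (ch :: rest) = false := by
          simp [List.isPrefixOf]; exact fun hh => hc hh
        simp only [hpre, Bool.false_eq_true]
        rw [if_neg (by simp), ih _ _ _ (by simpa using Nat.lt_of_succ_lt_succ h)]
        have hch : ch ≠ ' ' → True := fun _ => trivial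
        obtain ⟨hd, t, he⟩ := List.exists_cons_of_ne_nil (List.splitOnP_ne_nil (· == c) rest)
        have hchb : (ch == c) = false := by simp; exact fun hh => hc hh.symm
        simp [List.splitOn, List.splitOnP_cons, he, hchb, List.modifyHead_cons]

lemma pv_splitOn_bridge (s : List Char) (c : Char) :
    PySem.Chars.splitOn s [c] = s.splitOn c := by
  rw [PySem.Chars.splitOn, pv_go_eq c (s.length+1) s [] [] (by omega)]
  obtain ⟨hd, t, he⟩ := List.exists_cons_of_ne_nil (List.splitOnP_ne_nil (· == c) s)
  simp [List.splitOn, he]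

lemma pv_splitOn_no_sep (tl : List Char) (h : ' ' ∉ tl) : tl.splitOn ' ' = [tl] := by
  induction tl with
  | nil => rfl
  | cons c t ih =>
    have hc : c ≠ ' ' := fun hh => h (hh ▸ List.mem_cons_self ..)
    rw [pv_splitOn_cons_ne c t hc, ih (fun hm => h (List.mem_cons_of_mem _ hm))]
    rfl

lemma pv_splitOn_first (a rest : List Char) (ha : ' ' ∉ a) :
    (a ++ ' ' :: rest).splitOn ' ' = a :: rest.splitOn ' ' := by
  induction a with
  | nil => simpa using pv_splitOn_cons_sep rest
  | cons c t ih =>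
    have hc : c ≠ ' ' := fun hh => ha (hh ▸ List.mem_cons_self ..)
    rw [List.cons_append, pv_splitOn_cons_ne c _ hc, ih (fun hm => ha (List.mem_cons_of_mem _ hm))]
    rfl

lemma pv_splitOn_last (tl : List Char) :
    (tl ++ [' ']).splitOn ' ' = tl.splitOn ' ' ++ [[]] := by
  induction tl with
  | nil => simpa using pv_splitOn_cons_sep []
  | cons c t ih =>
    by_cases hc : c = ' '
    · subst hc
      rw [List.cons_append, pv_splitOn_cons_sep, pv_splitOn_cons_sep, ih]
      rfl
    · obtain ⟨hd, tt, he⟩ := List.exists_cons_of_ne_nil (List.splitOnP_ne_nil (· == ' ') t)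
      have he' : t.splitOn ' ' = hd :: tt := he
      rw [List.cons_append, pv_splitOn_cons_ne c _ hc, ih, pv_splitOn_cons_ne c t hc, he']
      rfl

lemma pv_prefix_token : ∀ (w a s : List Char), ' ' ∉ w → ' ' ∉ a →
    ((w ++ [' ']) <+: (a ++ ' ' :: s) ↔ w = a) := by
  intro w
  induction w with
  | nil =>
    intro a s _ ha
    cases a with
    | nil => simp
    | cons b a' =>
      simp only [List.nil_append, List.cons_append]
      constructor
      · intro hp
        rcases List.cons_prefix_cons.mp hp with ⟨hb, -⟩
        exact absurd hb.symm (fun hh => ha (hh ▸ List.mem_cons_self ..))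
      · intro hh; exact absurd hh.symm (List.cons_ne_nil _ _)
  | cons c w' ih =>
    intro a s hw ha
    cases a with
    | nil =>
      simp only [List.cons_append, List.nil_append]
      constructor
      · intro hp
        rcases List.cons_prefix_cons.mp hp with ⟨hb, -⟩
        exact absurd hb (fun hh => hw (hh ▸ List.mem_cons_self ..))
      · intro hh; exact absurd hh (List.cons_ne_nil _ _)
    | cons b a' =>
      simp only [List.cons_append]
      rw [List.cons_prefix_cons]
      have := ih a' s (fun hm => hw (List.mem_cons_of_mem _ hm)) (fun hm => ha (List.mem_cons_of_mem _ hm))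
      rw [this]
      constructor
      · rintro ⟨h1, h2⟩; rw [h1, h2]
      · intro hh; injection hh with h1 h2; exact ⟨h1, h2⟩

lemma pv_first_sep : ∀ (tl : List Char), ' ' ∈ tl →
    ∃ a rest, tl = a ++ ' ' :: rest ∧ ' ' ∉ a ∧ rest.length < tl.length := by
  intro tl
  induction tl with
  | nil => intro h; cases h
  | cons c t ih =>
    intro h
    by_cases hc : c = ' '
    · exact ⟨[], t, by rw [hc]; rfl, by simp, by simp⟩
    · have hm : ' ' ∈ t := by
        rcases List.mem_cons.mp h with h1 | h1
        · exact absurd h1.symm hc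
        · exact h1
      obtain ⟨a, rest, he, ha, hl⟩ := ih hm
      exact ⟨c :: a, rest, by rw [List.cons_append, he], by
        intro hmm
        rcases List.mem_cons.mp hmm with h1 | h1
        · exact hc h1.symm
        · exact ha h1, by simp; omega⟩

lemma pv_key_nospace (w tl : List Char) (hw : w ≠ []) (hsp : ' ' ∉ w) (htl : ' ' ∉ tl) :
    (∃ j : Nat, (' ' :: (w ++ [' '])) <+: ((' ' :: (tl ++ [' '])).drop j)) ↔ w = tl := by
  constructor
  · rintro ⟨j, hp⟩
    cases j with
    | zero =>
      rw [List.drop_zero] at hp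
      rcases List.cons_prefix_cons.mp hp with ⟨-, hp2⟩
      exact (pv_prefix_token w tl [] hsp htl).mp (by simpa using hp2)
    | succ j' =>
      rw [List.drop_succ_cons] at hp
      by_cases hj : j' < (tl ++ [' ']).length
      · rw [List.drop_eq_getElem_cons hj] at hp
        rcases List.cons_prefix_cons.mp hp with ⟨hh, hp2⟩
        by_cases hjt : j' < tl.length
        · apply absurd _ htl
          have h2 : (tl ++ [' '])[j'] = tl[j'] := List.getElem_append_left hjt
          rw [hh, h2]; exact List.getElem_mem _
        · have hj'' : j' = tl.length := by simp at hj; omega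
          have : (tl ++ [' ']).drop (j' + 1) = [] := by
            apply List.drop_eq_nil_of_le; simp; omega
          rw [this, List.prefix_nil] at hp2
          exact absurd (List.append_eq_nil_iff.mp hp2).1 hw
      · have : (tl ++ [' ']).drop j' = [] := List.drop_eq_nil_of_le (by omega)
        rw [this, List.prefix_nil] at hp
        cases hp
  · intro h
    subst h
    exact ⟨0, by simp⟩

lemma pv_key (w : List Char) (hw : w ≠ []) (hsp : ' ' ∉ w) :
    ∀ (n : Nat) (tl : List Char), tl.length ≤ n →
    ((∃ j : Nat, (' ' :: (w ++ [' '])) <+: ((' ' :: (tl ++ [' '])).drop j)) ↔ w ∈ tl.splitOn ' ') := by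
  have combo : ∀ tl : List Char, ' ' ∉ tl →
      ((∃ j : Nat, (' ' :: (w ++ [' '])) <+: ((' ' :: (tl ++ [' '])).drop j)) ↔ w ∈ tl.splitOn ' ') := by
    intro tl htl
    rw [pv_splitOn_no_sep tl htl, pv_key_nospace w tl hw hsp htl]
    simp
  intro n
  induction n with
  | zero =>
    intro tl hlen
    exact combo tl (by have : tl = [] := List.length_eq_zero_iff.mp (Nat.le_zero.mp hlen); simp [this])
  | succ m ih =>
    intro tl hlen
    by_cases hsep : ' ' ∈ tl
    · obtain ⟨a, rest, he, ha, hl⟩ := pv_first_sep tl hsep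
      subst he
      rw [pv_splitOn_first a rest ha]
      have hassoc : (a ++ ' ' :: rest) ++ [' '] = a ++ (' ' :: (rest ++ [' '])) := by simp
      have hrest := ih rest (by simp at hlen hl ⊢; omega)
      constructor
      · rintro ⟨j, hp⟩
        cases j with
        | zero =>
          rw [List.drop_zero] at hp
          rcases List.cons_prefix_cons.mp hp with ⟨-, hp2⟩
          rw [hassoc] at hp2
          exact List.mem_cons.mpr (Or.inl ((pv_prefix_token w a (rest ++ [' ']) hsp ha).mp hp2))
        | succ j' =>
          rw [List.drop_succ_cons, hassoc] at hp
          by_cases hja : j' < a.length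
          · exfalso
            have hj : j' < (a ++ (' ' :: (rest ++ [' ']))).length := by simp; omega
            rw [List.drop_eq_getElem_cons hj] at hp
            rcases List.cons_prefix_cons.mp hp with ⟨hh, -⟩
            apply ha
            have h2 : (a ++ (' ' :: (rest ++ [' '])))[j'] = a[j'] := List.getElem_append_left hja
            rw [hh, h2]; exact List.getElem_mem _
          · have hdrop : (a ++ (' ' :: (rest ++ [' ']))).drop j'
                = (' ' :: (rest ++ [' '])).drop (j' - a.length) := by
              rw [List.drop_append, List.drop_eq_nil_of_le (Nat.le_of_not_lt hja), List.nil_append]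
            rw [hdrop] at hp
            exact List.mem_cons.mpr (Or.inr (hrest.mp ⟨j' - a.length, hp⟩))
      · intro hmem
        rcases List.mem_cons.mp hmem with h1 | h1
        · refine ⟨0, ?_⟩
          rw [List.drop_zero, hassoc]
          rw [List.cons_prefix_cons]
          refine ⟨rfl, ?_⟩
          rw [h1]
          exact (List.prefix_append_right_inj a).mpr ⟨rest ++ [' '], by simp⟩
        · obtain ⟨i, hp⟩ := hrest.mpr h1
          refine ⟨a.length + 1 + i, ?_⟩
          have : (' ' :: ((a ++ ' ' :: rest) ++ [' '])).drop (a.length + 1 + i)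
              = (' ' :: (rest ++ [' '])).drop i := by
            rw [show a.length + 1 + i = (a.length + i) + 1 by omega, List.drop_succ_cons, hassoc,
               List.drop_append, List.drop_eq_nil_of_le (by omega), List.nil_append,
               show a.length + i - a.length = i by omega]
          rw [this]
          exact hp
    · exact combo tl hsep

lemma pv_word_eq (tl w : List Char) (hw : w ≠ []) (hsp : ' ' ∉ w) :
    PySem.Chars.isIn (' ' :: (w ++ [' '])) (' ' :: (tl ++ [' ']))
      = PySem.Set.contains (PySem.Set.ofList (PySem.Chars.splitOn (' ' :: (tl ++ [' '])) [' '])) w := by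
  rw [Bool.eq_iff_iff]
  rw [← PySem.Chars.exists_prefix_drop_iff_isIn]
  rw [pv_key w hw hsp tl.length tl le_rfl]
  rw [PySem.Set.contains_iff, PySem.Set.mem_ofList, pv_splitOn_bridge, pv_splitOn_cons_sep,
     pv_splitOn_last]
  simp [hw]

lemma pv_count_foldl (p : List Char → Bool) :
    ∀ (ws : List (List Char)) (acc : Int),
    ws.foldl (fun acc w => if p w then acc + 1 else acc) acc = acc + ((ws.filter p).length : Int) := by
  intro ws
  induction ws with
  | nil => intro acc; simp
  | cons hd t ih =>
    intro acc
    by_cases hp : p hd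
    · simp only [List.foldl_cons, hp, if_pos, List.filter_cons_of_pos]
      rw [ih]; simp only [List.length_cons]; push_cast; ring
    · simp only [List.foldl_cons, hp, Bool.false_eq_true]
      rw [ih]
      simp [hp]

lemma pv_score_eq (tl : List Char) (ws : List (List Char)) (hnd : ws.Nodup)
    (h : ∀ w ∈ ws, w ≠ [] ∧ ' ' ∉ w) :
    pvScoreA tl ws
      = pvScoreB (PySem.Set.ofList (PySem.Chars.splitOn (' ' :: (tl ++ [' '])) [' ']))
          (PySem.Set.ofList ws) := by
  rw [pvScoreA, pv_count_foldl, pvScoreB, PySem.Set.inter, PySem.Set.len,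
     PySem.Set.ofList_eq_self_of_nodup ws hnd, zero_add]
  exact_mod_cast congrArg List.length (List.filter_congr (fun w hm => pv_word_eq tl w (h w hm).1 (h w hm).2))

lemma pv_scoreB_nonneg (t ws : PySem.Set (List Char)) : 0 ≤ pvScoreB t ws := by
  rw [pvScoreB, PySem.Set.len]
  exact Int.natCast_nonneg _

set_option maxRecDepth 2000 in
set_option maxHeartbeats 2000000 in
theorem pv_main_eq (text : String) :
    detect_language_simple text = detect_language_simple_alt text := by
  rw [detect_language_simple, detect_language_simple_alt]
  set tl := PySem.Chars.lower text.toList with htl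
  set tokens := PySem.Set.ofList (PySem.Chars.splitOn (' ' :: (tl ++ [' '])) [' ']) with htok
  rw [pvPatternsA, pvPatternsB]
  simp only [List.foldl_cons, List.foldl_nil]
  rw [pv_score_eq tl pvWordsEn (by decide) (by decide),
      pv_score_eq tl pvWordsEs (by decide) (by decide),
      pv_score_eq tl pvWordsFr (by decide) (by decide),
      pv_score_eq tl pvWordsDe (by decide) (by decide)]
  set s1 := pvScoreB tokens (PySem.Set.ofList pvWordsEn) with hs1
  set s2 := pvScoreB tokens (PySem.Set.ofList pvWordsEs) with hs2
  set s3 := pvScoreB tokens (PySem.Set.ofList pvWordsFr) with hs3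
  set s4 := pvScoreB tokens (PySem.Set.ofList pvWordsDe) with hs4
  have h1 : (-1 : Int) < s1 := lt_of_lt_of_le (by norm_num) (pv_scoreB_nonneg tokens _)
  have hk : ((((PySem.Dict.empty.insert "en" s1).insert "es" s2).insert "fr" s3).insert "de" s4).keys
      = ["en", "es", "fr", "de"] := rfl
  simp only [PySem.Dict.getD_insert, PySem.Dict.getD_empty]
  simp only [PySem.List.max?, hk, List.foldl_cons, List.foldl_nil, h1, if_pos]
  by_cases h12 : s1 < s2
  · by_cases h23 : s2 < s3
    · by_cases h34 : s3 < s4 <;> simp [h12, h23, h34]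
    · by_cases h24 : s2 < s4 <;> simp [h12, h23, h24]
  · by_cases h13 : s1 < s3
    · by_cases h34 : s3 < s4 <;> simp [h12, h13, h34]
    · by_cases h14 : s1 < s4 <;> simp [h12, h13, h14]

-- ===== VERDICT (by name: the statement is the Claim_ definition above) =====
theorem detect_language_simple_spec : Claim_equal_detect_language_simple := by
  intro text _
  unfold Spec_detect_language_simple
  exact pv_main_eq text
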